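-- pv_equiv track=rewrite | github.com/mlockwood/go_transit_src | deprecated.py | _stack_times
-- ===== SOURCE A (Python) =====
-- def _stack_times(a, n):
--     i = 0
--     b = []
--     c = []
--     for entry in sorted(a):
--         if i < n:
--             c.append(entry)
--             i += 1
--         elif i == n:
--             b.append(c)
--             c = [entry]
--             i = 1
--     while i < n:
--         c.append('')
--         i += 1
--     b.append(c)
--     return [list(x) for x in zip(*b)]
-- ===== SOURCE B (Python) =====
-- def _stack_times(a, n):
--     # Column-major closed-form build: no chunk accumulation, no padding loop, no transpose.
--     if n <= 0:
--         return []
--     s = sorted(a)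
--     k = max(1, -(-len(s) // n))
--     return [[s[c * n + j] if c * n + j < len(s) else '' for c in range(k)]
--             for j in range(n)]
-- ===== Notes on version B (the rewrite author's own statement) =====
-- stated objective: alternative
-- what changed: B replaces A's row-major chunk accumulation loop, explicit ''-padding while-loop and zip(*) transpose with a direct column-major closed-form build: for each of the n output rows it indexes the sorted list at c*n+j, so no intermediate chunk list, padding or transpose step exists.
import Mathlib
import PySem

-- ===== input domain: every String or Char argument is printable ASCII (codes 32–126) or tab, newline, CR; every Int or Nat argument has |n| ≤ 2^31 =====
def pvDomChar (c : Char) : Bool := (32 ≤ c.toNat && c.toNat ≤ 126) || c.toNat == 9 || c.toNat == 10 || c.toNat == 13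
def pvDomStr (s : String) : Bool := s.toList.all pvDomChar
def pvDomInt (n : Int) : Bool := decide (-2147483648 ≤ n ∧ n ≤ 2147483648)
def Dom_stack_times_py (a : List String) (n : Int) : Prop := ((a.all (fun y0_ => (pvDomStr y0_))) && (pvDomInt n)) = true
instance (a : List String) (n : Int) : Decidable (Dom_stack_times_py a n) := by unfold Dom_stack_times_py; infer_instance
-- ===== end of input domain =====

-- B replaces A's chunk-accumulate / pad / transpose pipeline with a direct column-major
-- closed-form build (same result, different decomposition).

-- ===== PORT A =====
-- one step of A's 'for entry in sorted(a)' loop over state (i, b, c)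
def stackStep (n : Int) (st : Int × List (List String) × List String) (entry : String) :
    Int × List (List String) × List String :=
  let (i, b, c) := st
  if i < n then (i + 1, b, c ++ [entry])
  else if i = n then (1, b ++ [c], [entry])
  else (i, b, c)

-- A's 'while i < n: c.append('')' loop
def padLoop (i n : Int) (c : List String) : List String :=
  if i < n then padLoop (i + 1) n (c ++ [""]) else c
termination_by (n - i).toNat
decreasing_by omega

-- 'zip(*b)': transpose truncated to the shortest row, exactly Python's zip of the rows
def pyZipStar (rows : List (List String)) : List (List String) :=
  match rows with
  | [] => []
  | r :: rs =>
    let m := rs.foldl (fun acc l => min acc l.length) r.length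
    (List.range m).map (fun j => (r :: rs).map (fun l => l.getD j ""))

def stack_times_py (a : List String) (n : Int) : List (List String) :=
  let st := (PySem.List.sorted a id false).foldl (stackStep n) (0, [], [])
  pyZipStar (st.2.1 ++ [padLoop st.1 n st.2.2])

-- ===== PORT B =====
def stack_times_py_alt (a : List String) (n : Int) : List (List String) :=
  if n ≤ 0 then []
  else
    let s := PySem.List.sorted a id false
    let len : Int := s.length
    let k := max 1 (-(PySem.Int.floordiv (-len) n))
    (PySem.List.pyRange 0 n 1).map (fun j =>
      (PySem.List.pyRange 0 k 1).map (fun c =>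
        if c * n + j < len then (PySem.List.pyGet? s (c * n + j)).getD "" else ""))

-- ===== PRECONDITION & SPEC =====
def Spec_stack_times_py (a : List String) (n : Int) (out : List (List String)) : Prop := out = stack_times_py_alt a n
instance (a : List String) (n : Int) (out : List (List String)) : Decidable (Spec_stack_times_py a n out) := by unfold Spec_stack_times_py; infer_instance

-- ===== CLAIM (what is proved, stated in full; the proofs are below) =====
def Claim_equal_stack_times_py : Prop := ∀ (a : List String) (n : Int), Dom_stack_times_py a n → Spec_stack_times_py a n (stack_times_py a n)

-- ===== LEMMAS AND PROOFS =====

-- row-major grouping of l into chunks of size m+1 (last chunk short; [] gives [[]]),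
-- the shape A's main loop builds
def groupRows (m : Nat) (l : List String) : List (List String) :=
  if l.length ≤ m + 1 then [l] else l.take (m + 1) :: groupRows m (l.drop (m + 1))
termination_by l.length
decreasing_by simp; omega

lemma groupRows_ne_nil (m : Nat) (l : List String) : groupRows m l ≠ [] := by
  unfold groupRows; split <;> simp

lemma padLoop_eq : ∀ (k : Nat) (i n : Int) (c : List String), (n - i).toNat = k →
    padLoop i n c = c ++ List.replicate k "" := by
  intro k
  induction k with
  | zero =>
    intro i n c h
    unfold padLoop
    rw [if_neg (by omega)]
    simp
  | succ k ih =>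
    intro i n c h
    unfold padLoop
    rw [if_pos (by omega), ih (i + 1) n (c ++ [""]) (by omega)]
    simp [List.replicate_succ]

lemma fold_const (n i : Int) (b : List (List String)) (c : List String)
    (h1 : ¬ i < n) (h2 : i ≠ n) :
    ∀ s : List String, s.foldl (stackStep n) (i, b, c) = (i, b, c) := by
  intro s
  induction s with
  | nil => rfl
  | cons e s ih =>
    have : stackStep n (i, b, c) e = (i, b, c) := by
      simp [stackStep, h1, h2]
    simp [List.foldl_cons, this, ih]

lemma foldl_min_const (m : Nat) : ∀ rs : List (List String),
    (∀ r ∈ rs, r.length = m + 1) →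
    rs.foldl (fun acc l => min acc l.length) (m + 1) = m + 1 := by
  intro rs
  induction rs with
  | nil => intro _; rfl
  | cons r rs ih =>
    intro h
    have hr : r.length = m + 1 := h r (by simp)
    simp only [List.foldl_cons, hr, min_self]
    exact ih (fun x hx => h x (by simp [hx]))

lemma getLastD_irrel {α : Type} (g : List α) (d d' : α) (h : g ≠ []) :
    g.getLastD d = g.getLastD d' := by
  rw [List.getLastD_eq_getLast?, List.getLastD_eq_getLast?,
      List.getLast?_eq_some_getLast h]
  rfl

lemma getD_drop (l : List String) (k i : Nat) (d : String) :
    (l.drop k).getD i d = l.getD (k + i) d := by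
  simp [List.getD_eq_getElem?_getD, List.getElem?_drop]

-- A's loop invariant: starting from (c.length, b, c) with c not overfull, the loop
-- produces exactly the grouping of c ++ s appended to b
lemma loopA_eq (m : Nat) : ∀ (s c : List String) (b : List (List String)),
    c.length ≤ m + 1 →
    s.foldl (stackStep ((m : Int) + 1)) ((c.length : Int), b, c)
      = ((((groupRows m (c ++ s)).getLastD []).length : Int),
         b ++ (groupRows m (c ++ s)).dropLast,
         (groupRows m (c ++ s)).getLastD []) := by
  intro s
  induction s with
  | nil =>
    intro c b h
    simp only [List.foldl_nil, List.append_nil]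
    rw [groupRows, if_pos (by omega)]
    simp
  | cons e s ih =>
    intro c b h
    simp only [List.foldl_cons]
    by_cases hc : c.length < m + 1
    · have hstep : stackStep ((m : Int) + 1) ((c.length : Int), b, c) e
          = (((c ++ [e]).length : Int), b, c ++ [e]) := by
        simp only [stackStep]
        rw [if_pos (by omega)]
        simp
      rw [hstep, ih (c ++ [e]) b (by simp; omega)]
      simp [List.append_assoc]
    · have hc' : c.length = m + 1 := by omega
      have hstep : stackStep ((m : Int) + 1) ((c.length : Int), b, c) e
          = ((([e] : List String).length : Int), b ++ [c], [e]) := by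
        simp only [stackStep, hc']
        rw [if_neg (by push_cast; omega), if_pos (by push_cast; omega)]
        norm_num
      rw [hstep, ih [e] (b ++ [c]) (by simp)]
      have hg : groupRows m (c ++ e :: s) = c :: groupRows m ([e] ++ s) := by
        rw [groupRows, if_neg (by simp [hc'])]
        rw [List.take_left' hc', List.drop_left' hc']
        rfl
      have hne := groupRows_ne_nil m ([e] ++ s)
      rw [hg, List.dropLast_cons_of_ne_nil hne]
      have hlast : (c :: groupRows m ([e] ++ s)).getLastD []
          = (groupRows m ([e] ++ s)).getLastD [] := by
        rw [List.getLastD_cons]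
        exact getLastD_irrel _ _ _ hne
      rw [hlast]
      simp

-- the padded grouping, written column-major (closed form used by B)
lemma groupRows_pad (m : Nat) (l : List String) :
    (groupRows m l).dropLast
      ++ [(groupRows m l).getLastD []
            ++ List.replicate ((m + 1) - ((groupRows m l).getLastD []).length) ""]
      = (List.range (max 1 ((l.length + m) / (m + 1)))).map (fun c =>
          (List.range (m + 1)).map (fun j =>
            if c * (m + 1) + j < l.length then l.getD (c * (m + 1) + j) "" else "")) := by
  induction l using groupRows.induct (m := m) with
  | case1 l h =>
    rw [groupRows, if_pos h]
    have hK : max 1 ((l.length + m) / (m + 1)) = 1 := by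
      have : (l.length + m) / (m + 1) < 2 := by
        apply Nat.div_lt_of_lt_mul; omega
      omega
    rw [hK]
    simp only [List.dropLast, List.getLastD_cons, List.getLastD_nil, List.nil_append,
      List.range_one, List.map_cons, List.map_nil, List.cons.injEq, and_true]
    apply List.ext_getElem
    · simp; omega
    · intro i h1 h2
      simp only [List.getElem_map, List.getElem_range, Nat.zero_mul, Nat.zero_add]
      by_cases hi : i < l.length
      · rw [List.getElem_append_left hi, if_pos hi, List.getD_eq_getElem l "" hi]
      · rw [List.getElem_append_right (by omega), if_neg hi, List.getElem_replicate]
  | case2 l h ih =>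
    have hL : m + 1 < l.length := by omega
    rw [groupRows, if_neg h]
    have hg' := groupRows_ne_nil m (l.drop (m + 1))
    rw [List.dropLast_cons_of_ne_nil hg', List.getLastD_cons,
      getLastD_irrel _ _ ([] : List String) hg']
    have hKd : 1 ≤ (l.length - (m + 1) + m) / (m + 1) := by
      rw [Nat.one_le_div_iff (by omega)]; omega
    have hKl : max 1 ((l.length + m) / (m + 1))
        = max 1 (((l.drop (m + 1)).length + m) / (m + 1)) + 1 := by
      rw [List.length_drop]
      have h1 : l.length + m = (l.length - (m + 1) + m) + (m + 1) := by omega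
      rw [h1, Nat.add_div_right _ (by omega)]
      omega
    set Kd := max 1 (((List.drop (m + 1) l).length + m) / (m + 1)) with hKdef
    rw [hKl, List.range_succ_eq_map (n := Kd), List.map_cons, List.map_map]
    rw [List.cons_append, ih]
    congr 1
    · apply List.ext_getElem
      · simp; omega
      · intro i h1 h2
        simp only [List.getElem_take, List.getElem_map, List.getElem_range,
          Nat.zero_mul, Nat.zero_add]
        rw [if_pos (by simp at h1; omega), List.getD_eq_getElem l "" (by simp at h1; omega)]
    · apply List.map_congr_left
      intro c _
      simp only [Function.comp_apply, Nat.succ_eq_add_one]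
      apply List.map_congr_left
      intro j _
      have ht : (c + 1) * (m + 1) = c * (m + 1) + (m + 1) := by ring
      rw [getD_drop, List.length_drop]
      by_cases hcj : c * (m + 1) + j < l.length - (m + 1)
      · rw [if_pos (by omega), if_pos (by omega)]
        congr 1
        omega
      · rw [if_neg (by omega), if_neg (by omega)]

lemma pyZipStar_full (m : Nat) (rows : List (List String)) (hne : rows ≠ [])
    (hlen : ∀ r ∈ rows, r.length = m + 1) :
    pyZipStar rows = (List.range (m + 1)).map (fun j => rows.map (fun l => l.getD j "")) := by
  cases rows with
  | nil => exact absurd rfl hne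
  | cons r rs =>
    have hr : r.length = m + 1 := hlen r (by simp)
    show (List.range (rs.foldl (fun acc l => min acc l.length) r.length)).map _ = _
    rw [hr, foldl_min_const m rs (fun x hx => hlen x (by simp [hx]))]

lemma ceil_div_eq (L m : Nat) :
    -(PySem.Int.floordiv (-(L : Int)) ((m : Int) + 1)) = (((L + m) / (m + 1) : Nat) : Int) := by
  rw [PySem.Int.neg_floordiv_neg_eq_iff_of_pos (by omega)]
  have hd := Nat.div_add_mod (L + m) (m + 1)
  have hmod := Nat.mod_lt (L + m) (show 0 < m + 1 by omega)
  set K := (L + m) / (m + 1) with hK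
  obtain ⟨P, hP⟩ : ∃ P, (m + 1) * K = P := ⟨_, rfl⟩
  rw [hP] at hd
  constructor
  · have h1 : ((K : Int) - 1) * ((m : Int) + 1) = (P : Int) - ((m : Int) + 1) := by
      rw [← hP]; push_cast; ring
    rw [h1]; omega
  · have h2 : (K : Int) * ((m : Int) + 1) = (P : Int) := by
      rw [← hP]; push_cast; ring
    rw [h2]; omega

lemma stack_eq_pos (a : List String) (m : Nat) :
    stack_times_py a ((m : Int) + 1) = stack_times_py_alt a ((m : Int) + 1) := by
  unfold stack_times_py stack_times_py_alt
  rw [if_neg (by omega)]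
  have hl := loopA_eq m (PySem.List.sorted a id false) [] [] (by simp)
  simp only [List.nil_append, List.length_nil, Nat.cast_zero] at hl
  set s := PySem.List.sorted a id false with hs
  simp only [hl]
  set g := groupRows m s with hg
  set last := g.getLastD [] with hlast
  rw [padLoop_eq ((m + 1) - last.length) _ _ _ (by omega)]
  rw [groupRows_pad m s]
  rw [pyZipStar_full m _
    (by
      intro hcon
      rw [List.map_eq_nil_iff, List.range_eq_nil] at hcon
      omega)
    (by
      intro r hr
      rw [List.mem_map] at hr
      obtain ⟨c, _, rfl⟩ := hr
      simp)]
  rw [ceil_div_eq s.length m]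
  rw [show max (1 : Int) (((s.length + m) / (m + 1) : Nat) : Int)
        = ((max 1 ((s.length + m) / (m + 1)) : Nat) : Int) by simp [Nat.cast_max]]
  rw [show ((m : Int) + 1) = ((m + 1 : Nat) : Int) by push_cast; ring]
  rw [PySem.List.pyRange_zero_nat, PySem.List.pyRange_zero_nat]
  simp only [List.map_map]
  apply List.map_congr_left
  intro j hj
  rw [List.mem_range] at hj
  simp only [Function.comp_apply]
  apply List.map_congr_left
  intro c hc
  simp only [Function.comp_apply]
  rw [PySem.List.getD_map_range _ _ _ _ hj]
  have hidx : ((c : Int)) * ((m + 1 : Nat) : Int) + (j : Int) = ((c * (m + 1) + j : Nat) : Int) := by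
    push_cast; ring
  rw [hidx]
  by_cases hx : c * (m + 1) + j < s.length
  · rw [if_pos hx, if_pos (by exact_mod_cast hx)]
    rw [PySem.List.pyGet?_natCast, ← List.getD_eq_getElem?_getD]
  · rw [if_neg hx, if_neg (by exact_mod_cast hx)]

lemma stack_eq_nonpos (a : List String) (n : Int) (hn : n ≤ 0) :
    stack_times_py a n = [] := by
  unfold stack_times_py
  cases hs : PySem.List.sorted a id false with
  | nil => simp [padLoop, show ¬ (0:Int) < n by omega]; rfl
  | cons e s =>
    rcases eq_or_lt_of_le hn with h0 | h0
    · have hstep : stackStep n (0, [], []) e = (1, [[]], [e]) := by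
        simp [stackStep, ← h0]
      simp only [List.foldl_cons, hstep,
        fold_const n 1 [[]] [e] (by omega) (by omega)]
      rw [show padLoop 1 n [e] = [e] by unfold padLoop; rw [if_neg (by omega)]]
      rfl
    · have hstep : stackStep n (0, [], []) e = (0, [], []) := by
        simp [stackStep, show ¬ (0:Int) < n by omega, show (0:Int) ≠ n by omega]
      simp only [fold_const n 0 [] [] (by omega) (by omega)]
      rw [show padLoop 0 n [] = [] by unfold padLoop; rw [if_neg (by omega)]]
      rfl

-- ===== VERDICT (by name: the statement is the Claim_ definition above) =====
theorem stack_times_py_spec : Claim_equal_stack_times_py := by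
  intro a n _
  unfold Spec_stack_times_py
  rcases le_or_gt n 0 with hn | hn
  · rw [stack_eq_nonpos a n hn]
    unfold stack_times_py_alt
    simp [hn]
  · have hm : n = ((n - 1).toNat : Int) + 1 := by omega
    rw [hm]
    exact stack_eq_pos a (n - 1).toNat
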